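-- pv_equiv track=rewrite | github.com/Zeydel/Everybody-Codes | The Song of Ducks and Dragons/Quest06/Quest06_part1.py | get_possible_mentor_combinations
-- ===== SOURCE A (Python) =====
-- def get_possible_mentor_combinations(people, mentor, mentee):
--
--     # Init combinations as zero
--     combinations = 0
--
--     # Init number of seen mentors as zero
--     mentors = 0
--
--     # For every person in the list
--     for p in people:
--
--         # If it a mentor, increment count
--         if p == mentor:
--             mentors += 1
--
--         # If it a mentee, add number of seen mentors to the number
--         # of combinations
--         elif p == mentee:
--             combinations += mentors
--
--     # Return the number of combinations
--     return combinations
-- ===== SOURCE B (Python) =====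
-- def get_possible_mentor_combinations(people, mentor, mentee):
--     # Pass 1: prefix table, prefix[i] = number of mentors among people[:i]
--     prefix = [0]
--     for p in people:
--         prefix.append(prefix[-1] + (1 if p == mentor else 0))
--     # Pass 2: each mentee at index i pairs with the prefix[i] mentors before it
--     # (someone equal to both names counts as a mentor, never as a mentee)
--     total = 0
--     for i, p in enumerate(people):
--         if p == mentee and p != mentor:
--             total += prefix[i]
--     return total
-- ===== Notes on version B (the rewrite author's own statement) =====
-- stated objective: alternative
-- what changed: B is a staged two-pass algorithm: it first materialises a prefix table of cumulative mentor counts, then in a second pass sums the table entry at every mentee position, instead of A's single pass with two running counters.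
import Mathlib
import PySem

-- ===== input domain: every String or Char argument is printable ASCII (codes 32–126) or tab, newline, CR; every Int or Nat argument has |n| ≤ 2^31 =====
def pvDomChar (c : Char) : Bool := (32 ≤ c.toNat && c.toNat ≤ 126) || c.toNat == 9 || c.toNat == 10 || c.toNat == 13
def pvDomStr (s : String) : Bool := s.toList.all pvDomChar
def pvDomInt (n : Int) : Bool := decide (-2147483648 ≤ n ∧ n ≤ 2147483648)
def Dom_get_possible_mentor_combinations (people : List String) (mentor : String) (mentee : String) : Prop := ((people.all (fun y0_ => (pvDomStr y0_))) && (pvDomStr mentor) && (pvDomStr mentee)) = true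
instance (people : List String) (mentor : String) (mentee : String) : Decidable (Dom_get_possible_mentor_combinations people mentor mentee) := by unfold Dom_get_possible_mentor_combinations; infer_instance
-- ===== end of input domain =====

-- B replaces A's single pass with two counters by a staged two-pass algorithm: a pref table of cumulative mentor counts, then a sum over mentee positions.
-- ===== PORT A =====
-- step of A's loop: state (combinations, mentors)
def pvStepA (mentor mentee : String) (s : Int × Int) (p : String) : Int × Int :=
  if p == mentor then (s.1, s.2 + 1)
  else if p == mentee then (s.1 + s.2, s.2)
  else s

def get_possible_mentor_combinations (people : List String) (mentor : String) (mentee : String) : Int :=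
  (people.foldl (pvStepA mentor mentee) (0, 0)).1

-- ===== PORT B =====
-- pass 1 step: prefix.append(pref[-1] + (1 if p == mentor else 0))
def pvPrefixStep (mentor : String) (acc : List Int) (p : String) : List Int :=
  acc ++ [PySem.List.pyGetD acc (-1) 0 + (if p == mentor then 1 else 0)]

-- pass 2 step: if p == mentee and p != mentor: total += pref[i]
def pvSumStep (mentor mentee : String) (pref : List Int) (t : Int) (ip : Int × String) : Int :=
  if ip.2 == mentee && !(ip.2 == mentor) then t + PySem.List.pyGetD pref ip.1 0 else t

def get_possible_mentor_combinations_alt (people : List String) (mentor : String) (mentee : String) : Int :=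
  let pref := people.foldl (pvPrefixStep mentor) [0]
  (PySem.List.enumerate people 0).foldl (pvSumStep mentor mentee pref) 0

-- ===== PRECONDITION & SPEC =====
def Spec_get_possible_mentor_combinations (people : List String) (mentor : String) (mentee : String) (out : Int) : Prop := out = get_possible_mentor_combinations_alt people mentor mentee
instance (people : List String) (mentor : String) (mentee : String) (out : Int) : Decidable (Spec_get_possible_mentor_combinations people mentor mentee out) := by unfold Spec_get_possible_mentor_combinations; infer_instance

-- ===== CLAIM =====
def Claim_equal_get_possible_mentor_combinations : Prop := ∀ (people : List String) (mentor : String) (mentee : String), Dom_get_possible_mentor_combinations people mentor mentee → Spec_get_possible_mentor_combinations people mentor mentee (get_possible_mentor_combinations people mentor mentee)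

-- ===== LEMMAS AND PROOFS =====
-- number of elif-mentees in xs (elements equal to mentee but not to mentor)
def pvE (mentor mentee : String) : List String → Int
  | [] => 0
  | p :: xs => (if p == mentor then 0 else if p == mentee then 1 else 0) + pvE mentor mentee xs

-- number of (mentor, later elif-mentee) pairs in xs
def pvP (mentor mentee : String) : List String → Int
  | [] => 0
  | p :: xs => (if p == mentor then pvE mentor mentee xs else 0) + pvP mentor mentee xs

theorem foldA_char (mentor mentee : String) (xs : List String) : ∀ c m : Int,
    (xs.foldl (pvStepA mentor mentee) (c, m)).1 = c + m * pvE mentor mentee xs + pvP mentor mentee xs := by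
  induction xs with
  | nil => intro c m; simp [pvE, pvP]
  | cons p xs ih =>
    intro c m
    by_cases h1 : p == mentor
    · simp [pvStepA, pvE, pvP, h1, ih]; ring
    · by_cases h2 : p == mentee
      · simp [pvStepA, pvE, pvP, h1, h2, ih]; ring
      · simp [pvStepA, pvE, pvP, h1, h2, ih]

-- the mathematical content of pass 1: running pref sums of mentor indicators
def pvScan (mentor : String) (s : Int) : List String → List Int
  | [] => [s]
  | p :: xs => s :: pvScan mentor (s + (if p == mentor then 1 else 0)) xs

theorem prefix_char (mentor : String) (xs : List String) : ∀ (pre : List Int) (s : Int),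
    xs.foldl (pvPrefixStep mentor) (pre ++ [s]) = pre ++ pvScan mentor s xs := by
  induction xs with
  | nil => intro pre s; simp [pvScan]
  | cons p xs ih =>
    intro pre s
    have hstep : pvPrefixStep mentor (pre ++ [s]) p
        = (pre ++ [s]) ++ [s + (if p == mentor then 1 else 0)] := by
      simp [pvPrefixStep, PySem.List.pyGetD_neg_one_append_singleton]
    simp only [List.foldl_cons, hstep]
    rw [show (pre ++ [s]) ++ [s + (if p == mentor then 1 else 0)]
        = pre ++ [s] ++ [s + (if p == mentor then 1 else 0)] from rfl]
    rw [ih (pre ++ [s])]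
    simp [pvScan]

theorem sum_char (mentor mentee : String) (xs : List String) :
    ∀ (front : List Int) (s acc : Int),
    (PySem.List.enumerate xs (front.length : Int)).foldl
        (pvSumStep mentor mentee (front ++ pvScan mentor s xs)) acc
      = acc + s * pvE mentor mentee xs + pvP mentor mentee xs := by
  induction xs with
  | nil => intro front s acc; simp [PySem.List.enumerate_nil, pvE, pvP]
  | cons p xs ih =>
    intro front s acc
    rw [PySem.List.enumerate_cons]
    have hsplit : front ++ pvScan mentor s (p :: xs)
        = (front ++ [s]) ++ pvScan mentor (s + (if p == mentor then 1 else 0)) xs := by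
      simp [pvScan]
    have hget : PySem.List.pyGetD (front ++ pvScan mentor s (p :: xs)) (front.length : Int) 0 = s := by
      rw [hsplit, PySem.List.pyGetD_natCast]
      have : front.length < ((front ++ [s]) ++ pvScan mentor (s + (if p == mentor then 1 else 0)) xs).length := by
        simp
      rw [List.getD_eq_getElem _ _ this]
      rw [List.getElem_append_left (by simp)]
      simp
    have hlen : (front.length : Int) + 1 = (((front ++ [s]).length : Nat) : Int) := by
      simp
    simp only [List.foldl_cons]
    by_cases h1 : p == mentor
    · have hstep : pvSumStep mentor mentee (front ++ pvScan mentor s (p :: xs)) acc ((front.length : Int), p) = acc := by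
        simp [pvSumStep, h1]
      rw [hstep, hlen, hsplit, ih (front ++ [s])]
      simp [pvE, pvP, h1]; ring
    · by_cases h2 : p == mentee
      · have hstep : pvSumStep mentor mentee (front ++ pvScan mentor s (p :: xs)) acc ((front.length : Int), p) = acc + s := by
          simp [pvSumStep, h1, h2, hget]
        rw [hstep, hlen, hsplit, ih (front ++ [s])]
        simp [pvE, pvP, h1, h2]; ring
      · have hstep : pvSumStep mentor mentee (front ++ pvScan mentor s (p :: xs)) acc ((front.length : Int), p) = acc := by
          simp [pvSumStep, h2]
        rw [hstep, hlen, hsplit, ih (front ++ [s])]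
        simp [pvE, pvP, h1, h2]

-- ===== VERDICT =====
theorem get_possible_mentor_combinations_spec : Claim_equal_get_possible_mentor_combinations := by
  intro people mentor mentee _
  unfold Spec_get_possible_mentor_combinations get_possible_mentor_combinations get_possible_mentor_combinations_alt
  have hpre : people.foldl (pvPrefixStep mentor) [0] = pvScan mentor 0 people := by
    have := prefix_char mentor people [] 0
    simpa using this
  rw [foldA_char, hpre]
  have := sum_char mentor mentee people [] 0 0
  simp only [List.length_nil, Nat.cast_zero, List.nil_append] at this
  rw [this]
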